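-- pv_equiv track=rewrite | github.com/nik123-py/ok | art-ai/backend/ai/knowledge.py | _infer_action_from_title
-- ===== SOURCE A (Python) =====
-- from typing import Dict, List, Optional, Tuple
-- from enum import Enum
--
-- class Action(str, Enum):
--     """Attack actions that can be suggested as hints"""
--     SQL_INJECTION = "sql_injection_attempt"
--     XSS = "xss_attempt"
--     PATH_TRAVERSAL = "path_traversal_attempt"
--     COMMAND_INJECTION = "command_injection_attempt"
--     AUTHENTICATION_BYPASS = "authentication_bypass_attempt"
--     PRIVILEGE_ESCALATION = "privilege_escalation_attempt"
--     LATERAL_MOVEMENT = "lateral_movement_attempt"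
--     SSRF = "ssrf_attempt"
--     XXE = "xxe_attempt"
--     DESERIALIZATION = "deserialization_attempt"
--
-- def _infer_action_from_title(title: str, service_name: str) -> Optional[Action]:
--     """
--     Infer attack action from exploit title.
--
--     Args:
--         title: Exploit title/description
--         service_name: Service name
--
--     Returns:
--         Action enum or None
--     """
--     title_lower = title.lower()
--     service_lower = service_name.lower()
--
--     # SQL Injection
--     if any(term in title_lower for term in ["sql injection", "sqli", "sql injection"]):
--         return Action.SQL_INJECTION
--
--     # Path Traversal
--     if any(term in title_lower for term in ["path traversal", "directory traversal", "lfi", "local file inclusion"]):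
--         return Action.PATH_TRAVERSAL
--
--     # Command Injection
--     if any(term in title_lower for term in ["command injection", "rce", "remote code execution", "code execution"]):
--         return Action.COMMAND_INJECTION
--
--     # Authentication Bypass
--     if any(term in title_lower for term in ["authentication bypass", "auth bypass", "login bypass"]):
--         return Action.AUTHENTICATION_BYPASS
--
--     # XSS
--     if any(term in title_lower for term in ["xss", "cross-site scripting"]):
--         return Action.XSS
--
--     # Privilege Escalation
--     if any(term in title_lower for term in ["privilege escalation", "privilege", "escalation"]):
--         return Action.PRIVILEGE_ESCALATION
--
--     # SSRF
--     if any(term in title_lower for term in ["ssrf", "server-side request forgery"]):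
--         return Action.SSRF
--
--     # XXE
--     if any(term in title_lower for term in ["xxe", "xml external entity"]):
--         return Action.XXE
--
--     # Deserialization
--     if any(term in title_lower for term in ["deserialization", "unserialize"]):
--         return Action.DESERIALIZATION
--
--     # Default based on service type
--     if "mysql" in service_lower or "postgresql" in service_lower or "sql" in service_lower:
--         return Action.SQL_INJECTION
--
--     if "apache" in service_lower or "nginx" in service_lower or "web" in service_lower:
--         return Action.PATH_TRAVERSAL
--
--     return None
-- ===== SOURCE B (Python) =====
-- from typing import Dict, List, Optional, Tuple
-- from enum import Enum
--
-- class Action(str, Enum):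
--     """Attack actions that can be suggested as hints"""
--     SQL_INJECTION = "sql_injection_attempt"
--     XSS = "xss_attempt"
--     PATH_TRAVERSAL = "path_traversal_attempt"
--     COMMAND_INJECTION = "command_injection_attempt"
--     AUTHENTICATION_BYPASS = "authentication_bypass_attempt"
--     PRIVILEGE_ESCALATION = "privilege_escalation_attempt"
--     LATERAL_MOVEMENT = "lateral_movement_attempt"
--     SSRF = "ssrf_attempt"
--     XXE = "xxe_attempt"
--     DESERIALIZATION = "deserialization_attempt"
--
-- # One flat keyword map: keyword -> (priority, field, action).  No ordered
-- # cascade: ALL keywords are tested, and the minimum-priority match wins.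
-- # Priorities 0-8 are the title categories, 9-10 the service fallbacks, so the
-- # minimum coincides with the cascade's first hit.
-- KEYWORD_MAP = {
--     "sql injection": (0, "title", Action.SQL_INJECTION),
--     "sqli": (0, "title", Action.SQL_INJECTION),
--     "path traversal": (1, "title", Action.PATH_TRAVERSAL),
--     "directory traversal": (1, "title", Action.PATH_TRAVERSAL),
--     "lfi": (1, "title", Action.PATH_TRAVERSAL),
--     "local file inclusion": (1, "title", Action.PATH_TRAVERSAL),
--     "command injection": (2, "title", Action.COMMAND_INJECTION),
--     "rce": (2, "title", Action.COMMAND_INJECTION),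
--     "remote code execution": (2, "title", Action.COMMAND_INJECTION),
--     "code execution": (2, "title", Action.COMMAND_INJECTION),
--     "authentication bypass": (3, "title", Action.AUTHENTICATION_BYPASS),
--     "auth bypass": (3, "title", Action.AUTHENTICATION_BYPASS),
--     "login bypass": (3, "title", Action.AUTHENTICATION_BYPASS),
--     "xss": (4, "title", Action.XSS),
--     "cross-site scripting": (4, "title", Action.XSS),
--     "privilege escalation": (5, "title", Action.PRIVILEGE_ESCALATION),
--     "privilege": (5, "title", Action.PRIVILEGE_ESCALATION),
--     "escalation": (5, "title", Action.PRIVILEGE_ESCALATION),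
--     "ssrf": (6, "title", Action.SSRF),
--     "server-side request forgery": (6, "title", Action.SSRF),
--     "xxe": (7, "title", Action.XXE),
--     "xml external entity": (7, "title", Action.XXE),
--     "deserialization": (8, "title", Action.DESERIALIZATION),
--     "unserialize": (8, "title", Action.DESERIALIZATION),
--     "mysql": (9, "service", Action.SQL_INJECTION),
--     "postgresql": (9, "service", Action.SQL_INJECTION),
--     "sql": (9, "service", Action.SQL_INJECTION),
--     "apache": (10, "service", Action.PATH_TRAVERSAL),
--     "nginx": (10, "service", Action.PATH_TRAVERSAL),
--     "web": (10, "service", Action.PATH_TRAVERSAL),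
-- }
--
-- def _infer_action_from_title(title: str, service_name: str) -> Optional[Action]:
--     texts = {"title": title.lower(), "service": service_name.lower()}
--     best = None  # (priority, action) of the best match seen so far
--     for keyword, (priority, field, action) in KEYWORD_MAP.items():
--         if keyword in texts[field] and (best is None or priority < best[0]):
--             best = (priority, action)
--     return best[1] if best is not None else None
-- ===== Notes on version B (the rewrite author's own statement) =====
-- stated objective: alternative
-- what changed: A's ordered first-match if-cascade is replaced by a single flat keyword->(priority,field,action) map scanned once while accumulating the minimum-priority match (all keywords tested, no early return); the min over priorities coincides with the cascade's first hit.
import Mathlib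
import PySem

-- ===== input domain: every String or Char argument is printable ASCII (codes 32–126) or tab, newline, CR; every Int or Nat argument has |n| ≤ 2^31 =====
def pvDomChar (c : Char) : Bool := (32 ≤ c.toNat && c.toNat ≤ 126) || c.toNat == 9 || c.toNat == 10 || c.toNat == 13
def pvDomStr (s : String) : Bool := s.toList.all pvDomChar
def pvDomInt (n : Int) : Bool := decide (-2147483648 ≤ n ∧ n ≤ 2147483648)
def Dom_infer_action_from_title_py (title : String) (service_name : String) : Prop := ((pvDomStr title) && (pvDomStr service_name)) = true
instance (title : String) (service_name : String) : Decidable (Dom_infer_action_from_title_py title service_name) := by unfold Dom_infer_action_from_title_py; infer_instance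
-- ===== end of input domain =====

-- B replaces A's ordered first-match if-cascade by one flat keyword map scanned
-- while accumulating the minimum-priority match (objective: alternative); same values everywhere.

-- ===== PORT A =====
def infer_action_from_title_py (title : String) (service_name : String) : Option String :=
  let title_lower := PySem.Str.lower title
  let service_lower := PySem.Str.lower service_name
  if ["sql injection", "sqli", "sql injection"].any (fun t => PySem.Str.isIn t title_lower) then
    some "sql_injection_attempt"
  else if ["path traversal", "directory traversal", "lfi", "local file inclusion"].any (fun t => PySem.Str.isIn t title_lower) then
    some "path_traversal_attempt"
  else if ["command injection", "rce", "remote code execution", "code execution"].any (fun t => PySem.Str.isIn t title_lower) then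
    some "command_injection_attempt"
  else if ["authentication bypass", "auth bypass", "login bypass"].any (fun t => PySem.Str.isIn t title_lower) then
    some "authentication_bypass_attempt"
  else if ["xss", "cross-site scripting"].any (fun t => PySem.Str.isIn t title_lower) then
    some "xss_attempt"
  else if ["privilege escalation", "privilege", "escalation"].any (fun t => PySem.Str.isIn t title_lower) then
    some "privilege_escalation_attempt"
  else if ["ssrf", "server-side request forgery"].any (fun t => PySem.Str.isIn t title_lower) then
    some "ssrf_attempt"
  else if ["xxe", "xml external entity"].any (fun t => PySem.Str.isIn t title_lower) then
    some "xxe_attempt"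
  else if ["deserialization", "unserialize"].any (fun t => PySem.Str.isIn t title_lower) then
    some "deserialization_attempt"
  else if PySem.Str.isIn "mysql" service_lower || PySem.Str.isIn "postgresql" service_lower || PySem.Str.isIn "sql" service_lower then
    some "sql_injection_attempt"
  else if PySem.Str.isIn "apache" service_lower || PySem.Str.isIn "nginx" service_lower || PySem.Str.isIn "web" service_lower then
    some "path_traversal_attempt"
  else
    none

-- ===== PORT B =====
-- keyword -> (priority, is_service_field, action); the minimum priority wins
def pvKeywordMap : List (String × Nat × Bool × String) :=
  [ ("sql injection", 0, false, "sql_injection_attempt")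
  , ("sqli", 0, false, "sql_injection_attempt")
  , ("path traversal", 1, false, "path_traversal_attempt")
  , ("directory traversal", 1, false, "path_traversal_attempt")
  , ("lfi", 1, false, "path_traversal_attempt")
  , ("local file inclusion", 1, false, "path_traversal_attempt")
  , ("command injection", 2, false, "command_injection_attempt")
  , ("rce", 2, false, "command_injection_attempt")
  , ("remote code execution", 2, false, "command_injection_attempt")
  , ("code execution", 2, false, "command_injection_attempt")
  , ("authentication bypass", 3, false, "authentication_bypass_attempt")
  , ("auth bypass", 3, false, "authentication_bypass_attempt")
  , ("login bypass", 3, false, "authentication_bypass_attempt")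
  , ("xss", 4, false, "xss_attempt")
  , ("cross-site scripting", 4, false, "xss_attempt")
  , ("privilege escalation", 5, false, "privilege_escalation_attempt")
  , ("privilege", 5, false, "privilege_escalation_attempt")
  , ("escalation", 5, false, "privilege_escalation_attempt")
  , ("ssrf", 6, false, "ssrf_attempt")
  , ("server-side request forgery", 6, false, "ssrf_attempt")
  , ("xxe", 7, false, "xxe_attempt")
  , ("xml external entity", 7, false, "xxe_attempt")
  , ("deserialization", 8, false, "deserialization_attempt")
  , ("unserialize", 8, false, "deserialization_attempt")
  , ("mysql", 9, true, "sql_injection_attempt")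
  , ("postgresql", 9, true, "sql_injection_attempt")
  , ("sql", 9, true, "sql_injection_attempt")
  , ("apache", 10, true, "path_traversal_attempt")
  , ("nginx", 10, true, "path_traversal_attempt")
  , ("web", 10, true, "path_traversal_attempt") ]

def pvStep (title_lower service_lower : String) (best : Option (Nat × String))
    (e : String × Nat × Bool × String) : Option (Nat × String) :=
  let text := if e.2.2.1 then service_lower else title_lower
  if PySem.Str.isIn e.1 text &&
     (match best with | none => true | some b => decide (e.2.1 < b.1)) then
    some (e.2.1, e.2.2.2)
  else best

def infer_action_from_title_py_alt (title : String) (service_name : String) : Option String :=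
  let title_lower := PySem.Str.lower title
  let service_lower := PySem.Str.lower service_name
  match pvKeywordMap.foldl (pvStep title_lower service_lower) none with
  | some b => some b.2
  | none => none

-- ===== PRECONDITION & SPEC =====
def Spec_infer_action_from_title_py (title : String) (service_name : String) (out : Option String) : Prop := out = infer_action_from_title_py_alt title service_name
instance (title : String) (service_name : String) (out : Option String) : Decidable (Spec_infer_action_from_title_py title service_name out) := by unfold Spec_infer_action_from_title_py; infer_instance

-- ===== CLAIM (what is proved, stated in full; the proofs are below) =====
def Claim_equal_infer_action_from_title_py : Prop := ∀ (title : String) (service_name : String), Dom_infer_action_from_title_py title service_name → Spec_infer_action_from_title_py title service_name (infer_action_from_title_py title service_name)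

-- ===== LEMMAS AND PROOFS =====
-- first-match recursion, used only to characterise the fold
def pvFirst (title_lower service_lower : String) :
    List (String × Nat × Bool × String) → Option (Nat × String)
  | [] => none
  | e :: rest =>
      if PySem.Str.isIn e.1 (if e.2.2.1 then service_lower else title_lower) then
        some (e.2.1, e.2.2.2)
      else pvFirst title_lower service_lower rest

-- once a match of minimal priority is held, later entries (all ≥ that priority) never replace it
theorem pvStep_keep (tl sl : String) (p : Nat) (a : String)
    (l : List (String × Nat × Bool × String)) (h : ∀ e ∈ l, p ≤ e.2.1) :
    l.foldl (pvStep tl sl) (some (p, a)) = some (p, a) := by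
  induction l with
  | nil => rfl
  | cons e rest ih =>
      have hp : p ≤ e.2.1 := h e (List.mem_cons_self ..)
      have : pvStep tl sl (some (p, a)) e = some (p, a) := by
        simp only [pvStep]
        rw [Bool.and_eq_false_iff.mpr (Or.inr (by simp [Nat.not_lt.mpr hp]))]
        rfl
      rw [List.foldl_cons, this]
      exact ih (fun e he => h e (List.mem_cons_of_mem _ he))

-- over a priority-nondecreasing list the min-accumulating fold IS first-match
theorem pvFold_eq_first (tl sl : String) (l : List (String × Nat × Bool × String))
    (h : l.Pairwise (fun a b => a.2.1 ≤ b.2.1)) :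
    l.foldl (pvStep tl sl) none = pvFirst tl sl l := by
  induction l with
  | nil => rfl
  | cons e rest ih =>
      rw [List.pairwise_cons] at h
      rw [List.foldl_cons, pvFirst]
      by_cases hm : PySem.Str.isIn e.1 (if e.2.2.1 then sl else tl) = true
      · have : pvStep tl sl none e = some (e.2.1, e.2.2.2) := by
          simp only [pvStep]; rw [hm]; rfl
        rw [this, if_pos hm]
        exact pvStep_keep tl sl _ _ rest h.1
      · have : pvStep tl sl none e = none := by
          simp only [pvStep]; rw [Bool.not_eq_true] at hm; rw [hm]; rfl
        rw [this, if_neg hm]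
        exact ih h.2

theorem pvKeywordMap_sorted :
    pvKeywordMap.Pairwise (fun a b => a.2.1 ≤ b.2.1) := by decide

-- ===== VERDICT (by name: the statement is the Claim_ definition above) =====
set_option maxHeartbeats 4000000 in
theorem infer_action_from_title_py_spec : Claim_equal_infer_action_from_title_py := by
  intro title service_name _
  simp only [Spec_infer_action_from_title_py, infer_action_from_title_py,
    infer_action_from_title_py_alt]
  rw [pvFold_eq_first _ _ _ pvKeywordMap_sorted]
  simp only [pvKeywordMap, pvFirst, List.any_cons, List.any_nil, Bool.or_false]
  by_cases h0 : PySem.Chars.isIn ['s', 'q', 'l', ' ', 'i', 'n', 'j', 'e', 'c', 't', 'i', 'o', 'n'] (PySem.Chars.lower title.toList) = true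
  · simp [h0]
  by_cases h1 : PySem.Chars.isIn ['s', 'q', 'l', 'i'] (PySem.Chars.lower title.toList) = true
  · simp [h0, h1]
  by_cases h2 : PySem.Chars.isIn ['p', 'a', 't', 'h', ' ', 't', 'r', 'a', 'v', 'e', 'r', 's', 'a', 'l'] (PySem.Chars.lower title.toList) = true
  · simp [h0, h1, h2]
  by_cases h3 : PySem.Chars.isIn ['d', 'i', 'r', 'e', 'c', 't', 'o', 'r', 'y', ' ', 't', 'r', 'a', 'v', 'e', 'r', 's', 'a', 'l'] (PySem.Chars.lower title.toList) = true
  · simp [h0, h1, h2, h3]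
  by_cases h4 : PySem.Chars.isIn ['l', 'f', 'i'] (PySem.Chars.lower title.toList) = true
  · simp [h0, h1, h2, h3, h4]
  by_cases h5 : PySem.Chars.isIn ['l', 'o', 'c', 'a', 'l', ' ', 'f', 'i', 'l', 'e', ' ', 'i', 'n', 'c', 'l', 'u', 's', 'i', 'o', 'n'] (PySem.Chars.lower title.toList) = true
  · simp [h0, h1, h2, h3, h4, h5]
  by_cases h6 : PySem.Chars.isIn ['c', 'o', 'm', 'm', 'a', 'n', 'd', ' ', 'i', 'n', 'j', 'e', 'c', 't', 'i', 'o', 'n'] (PySem.Chars.lower title.toList) = true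
  · simp [h0, h1, h2, h3, h4, h5, h6]
  by_cases h7 : PySem.Chars.isIn ['r', 'c', 'e'] (PySem.Chars.lower title.toList) = true
  · simp [h0, h1, h2, h3, h4, h5, h6, h7]
  by_cases h8 : PySem.Chars.isIn ['r', 'e', 'm', 'o', 't', 'e', ' ', 'c', 'o', 'd', 'e', ' ', 'e', 'x', 'e', 'c', 'u', 't', 'i', 'o', 'n'] (PySem.Chars.lower title.toList) = true
  · simp [h0, h1, h2, h3, h4, h5, h6, h7, h8]
  by_cases h9 : PySem.Chars.isIn ['c', 'o', 'd', 'e', ' ', 'e', 'x', 'e', 'c', 'u', 't', 'i', 'o', 'n'] (PySem.Chars.lower title.toList) = true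
  · simp [h0, h1, h2, h3, h4, h5, h6, h7, h8, h9]
  by_cases h10 : PySem.Chars.isIn ['a', 'u', 't', 'h', 'e', 'n', 't', 'i', 'c', 'a', 't', 'i', 'o', 'n', ' ', 'b', 'y', 'p', 'a', 's', 's'] (PySem.Chars.lower title.toList) = true
  · simp [h0, h1, h2, h3, h4, h5, h6, h7, h8, h9, h10]
  by_cases h11 : PySem.Chars.isIn ['a', 'u', 't', 'h', ' ', 'b', 'y', 'p', 'a', 's', 's'] (PySem.Chars.lower title.toList) = true
  · simp [h0, h1, h2, h3, h4, h5, h6, h7, h8, h9, h10, h11]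
  by_cases h12 : PySem.Chars.isIn ['l', 'o', 'g', 'i', 'n', ' ', 'b', 'y', 'p', 'a', 's', 's'] (PySem.Chars.lower title.toList) = true
  · simp [h0, h1, h2, h3, h4, h5, h6, h7, h8, h9, h10, h11, h12]
  by_cases h13 : PySem.Chars.isIn ['x', 's', 's'] (PySem.Chars.lower title.toList) = true
  · simp [h0, h1, h2, h3, h4, h5, h6, h7, h8, h9, h10, h11, h12, h13]
  by_cases h14 : PySem.Chars.isIn ['c', 'r', 'o', 's', 's', '-', 's', 'i', 't', 'e', ' ', 's', 'c', 'r', 'i', 'p', 't', 'i', 'n', 'g'] (PySem.Chars.lower title.toList) = true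
  · simp [h0, h1, h2, h3, h4, h5, h6, h7, h8, h9, h10, h11, h12, h13, h14]
  by_cases h15 : PySem.Chars.isIn ['p', 'r', 'i', 'v', 'i', 'l', 'e', 'g', 'e', ' ', 'e', 's', 'c', 'a', 'l', 'a', 't', 'i', 'o', 'n'] (PySem.Chars.lower title.toList) = true
  · simp [h0, h1, h2, h3, h4, h5, h6, h7, h8, h9, h10, h11, h12, h13, h14, h15]
  by_cases h16 : PySem.Chars.isIn ['p', 'r', 'i', 'v', 'i', 'l', 'e', 'g', 'e'] (PySem.Chars.lower title.toList) = true
  · simp [h0, h1, h2, h3, h4, h5, h6, h7, h8, h9, h10, h11, h12, h13, h14, h15, h16]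
  by_cases h17 : PySem.Chars.isIn ['e', 's', 'c', 'a', 'l', 'a', 't', 'i', 'o', 'n'] (PySem.Chars.lower title.toList) = true
  · simp [h0, h1, h2, h3, h4, h5, h6, h7, h8, h9, h10, h11, h12, h13, h14, h15, h16, h17]
  by_cases h18 : PySem.Chars.isIn ['s', 's', 'r', 'f'] (PySem.Chars.lower title.toList) = true
  · simp [h0, h1, h2, h3, h4, h5, h6, h7, h8, h9, h10, h11, h12, h13, h14, h15, h16, h17, h18]
  by_cases h19 : PySem.Chars.isIn ['s', 'e', 'r', 'v', 'e', 'r', '-', 's', 'i', 'd', 'e', ' ', 'r', 'e', 'q', 'u', 'e', 's', 't', ' ', 'f', 'o', 'r', 'g', 'e', 'r', 'y'] (PySem.Chars.lower title.toList) = true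
  · simp [h0, h1, h2, h3, h4, h5, h6, h7, h8, h9, h10, h11, h12, h13, h14, h15, h16, h17, h18, h19]
  by_cases h20 : PySem.Chars.isIn ['x', 'x', 'e'] (PySem.Chars.lower title.toList) = true
  · simp [h0, h1, h2, h3, h4, h5, h6, h7, h8, h9, h10, h11, h12, h13, h14, h15, h16, h17, h18, h19, h20]
  by_cases h21 : PySem.Chars.isIn ['x', 'm', 'l', ' ', 'e', 'x', 't', 'e', 'r', 'n', 'a', 'l', ' ', 'e', 'n', 't', 'i', 't', 'y'] (PySem.Chars.lower title.toList) = true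
  · simp [h0, h1, h2, h3, h4, h5, h6, h7, h8, h9, h10, h11, h12, h13, h14, h15, h16, h17, h18, h19, h20, h21]
  by_cases h22 : PySem.Chars.isIn ['d', 'e', 's', 'e', 'r', 'i', 'a', 'l', 'i', 'z', 'a', 't', 'i', 'o', 'n'] (PySem.Chars.lower title.toList) = true
  · simp [h0, h1, h2, h3, h4, h5, h6, h7, h8, h9, h10, h11, h12, h13, h14, h15, h16, h17, h18, h19, h20, h21, h22]
  by_cases h23 : PySem.Chars.isIn ['u', 'n', 's', 'e', 'r', 'i', 'a', 'l', 'i', 'z', 'e'] (PySem.Chars.lower title.toList) = true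
  · simp [h0, h1, h2, h3, h4, h5, h6, h7, h8, h9, h10, h11, h12, h13, h14, h15, h16, h17, h18, h19, h20, h21, h22, h23]
  by_cases g0 : PySem.Chars.isIn ['m', 'y', 's', 'q', 'l'] (PySem.Chars.lower service_name.toList) = true
  · simp [h0, h1, h2, h3, h4, h5, h6, h7, h8, h9, h10, h11, h12, h13, h14, h15, h16, h17, h18, h19, h20, h21, h22, h23, g0]
  by_cases g1 : PySem.Chars.isIn ['p', 'o', 's', 't', 'g', 'r', 'e', 's', 'q', 'l'] (PySem.Chars.lower service_name.toList) = true
  · simp [h0, h1, h2, h3, h4, h5, h6, h7, h8, h9, h10, h11, h12, h13, h14, h15, h16, h17, h18, h19, h20, h21, h22, h23, g0, g1]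
  by_cases g2 : PySem.Chars.isIn ['s', 'q', 'l'] (PySem.Chars.lower service_name.toList) = true
  · simp [h0, h1, h2, h3, h4, h5, h6, h7, h8, h9, h10, h11, h12, h13, h14, h15, h16, h17, h18, h19, h20, h21, h22, h23, g0, g1, g2]
  by_cases g3 : PySem.Chars.isIn ['a', 'p', 'a', 'c', 'h', 'e'] (PySem.Chars.lower service_name.toList) = true
  · simp [h0, h1, h2, h3, h4, h5, h6, h7, h8, h9, h10, h11, h12, h13, h14, h15, h16, h17, h18, h19, h20, h21, h22, h23, g0, g1, g2, g3]
  by_cases g4 : PySem.Chars.isIn ['n', 'g', 'i', 'n', 'x'] (PySem.Chars.lower service_name.toList) = true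
  · simp [h0, h1, h2, h3, h4, h5, h6, h7, h8, h9, h10, h11, h12, h13, h14, h15, h16, h17, h18, h19, h20, h21, h22, h23, g0, g1, g2, g3, g4]
  by_cases g5 : PySem.Chars.isIn ['w', 'e', 'b'] (PySem.Chars.lower service_name.toList) = true
  · simp [h0, h1, h2, h3, h4, h5, h6, h7, h8, h9, h10, h11, h12, h13, h14, h15, h16, h17, h18, h19, h20, h21, h22, h23, g0, g1, g2, g3, g4, g5]
  simp [h0, h1, h2, h3, h4, h5, h6, h7, h8, h9, h10, h11, h12, h13, h14, h15, h16, h17, h18, h19, h20, h21, h22, h23, g0, g1, g2, g3, g4, g5]
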